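-- pv_equiv track=rewrite | github.com/ailan22/Python | ejercicios_python/Clase04/busqueda_en_listas.py | buscar_n_elemento
-- ===== SOURCE A (Python) =====
-- def buscar_n_elemento(lista, i):
--     cont = 0
--     pos = -1
--     for y, elem in enumerate(lista):
--         if elem == i:
--             pos = y
--             cont += 1
--     return 'Posición: ', pos, 'Cantidad de veces repetidas: ', cont
-- ===== SOURCE B (Python) =====
-- def buscar_n_elemento(lista, i):
--     cont = lista.count(i)
--     pos = len(lista) - 1 - lista[::-1].index(i) if i in lista else -1
--     return 'Posición: ', pos, 'Cantidad de veces repetidas: ', cont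
-- ===== Notes on version B (the rewrite author's own statement) =====
-- stated objective: simpler
-- what changed: The single accumulating loop maintaining count and last position together is replaced by two independent computations: lista.count(i) and a reverse search (len-1-lista[::-1].index(i)) guarded by membership.
import Mathlib
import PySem

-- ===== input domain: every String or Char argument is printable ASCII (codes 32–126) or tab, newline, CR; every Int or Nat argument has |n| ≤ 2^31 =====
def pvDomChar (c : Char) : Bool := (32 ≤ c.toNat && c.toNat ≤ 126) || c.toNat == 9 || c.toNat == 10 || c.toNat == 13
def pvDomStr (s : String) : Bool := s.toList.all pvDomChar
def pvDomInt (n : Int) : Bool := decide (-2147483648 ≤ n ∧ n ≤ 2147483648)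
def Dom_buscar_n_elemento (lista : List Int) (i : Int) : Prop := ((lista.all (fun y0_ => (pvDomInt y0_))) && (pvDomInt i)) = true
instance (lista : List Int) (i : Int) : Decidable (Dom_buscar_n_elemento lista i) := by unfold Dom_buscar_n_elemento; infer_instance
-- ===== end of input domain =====

-- B replaces A's single loop that maintains count and last position together by two
-- independent computations (a count and a reverse search); simpler decomposition, same cost.

-- ===== PORT A =====
def buscar_n_elemento (lista : List Int) (i : Int) : String × Int × String × Int :=
  let st := (PySem.List.enumerate lista).foldl
    (fun (s : Int × Int) (p : Int × Int) => if p.2 == i then (s.1 + 1, p.1) else s)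
    (0, -1)
  ("Posición: ", st.2, "Cantidad de veces repetidas: ", st.1)

-- ===== PORT B =====
def buscar_n_elemento_alt (lista : List Int) (i : Int) : String × Int × String × Int :=
  let cont : Int := (PySem.List.count lista i : Nat)
  let pos : Int :=
    if lista.contains i then
      (lista.length : Int) - 1 -
        ((PySem.List.index? ((PySem.List.slice? lista none none (-1)).getD []) i).getD 0 : Nat)
    else -1
  ("Posición: ", pos, "Cantidad de veces repetidas: ", cont)

-- ===== PRECONDITION & SPEC =====
def Spec_buscar_n_elemento (lista : List Int) (i : Int) (out : String × Int × String × Int) : Prop := out = buscar_n_elemento_alt lista i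
instance (lista : List Int) (i : Int) (out : String × Int × String × Int) : Decidable (Spec_buscar_n_elemento lista i out) := by unfold Spec_buscar_n_elemento; infer_instance

-- ===== CLAIM (what is proved, stated in full; the proofs are below) =====
def Claim_equal_buscar_n_elemento : Prop := ∀ (lista : List Int) (i : Int), Dom_buscar_n_elemento lista i → Spec_buscar_n_elemento lista i (buscar_n_elemento lista i)

-- ===== LEMMAS AND PROOFS =====

-- A's loop computes the count and the index of the LAST occurrence of i (default p):
lemma foldA (i : Int) : ∀ (xs : List Int) (s c p : Int),
    (PySem.List.enumerate xs s).foldl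
      (fun (st : Int × Int) (pr : Int × Int) => if pr.2 == i then (st.1 + 1, pr.1) else st)
      (c, p)
    = (c + (xs.count i : Int),
       if i ∈ xs then
         s + (xs.length : Int) - 1 - (((PySem.List.index? xs.reverse i).getD 0 : Nat) : Int)
       else p) := by
  intro xs
  induction xs with
  | nil => intro s c p; simp [PySem.List.enumerate_nil]
  | cons x xs ih =>
    intro s c p
    rw [PySem.List.enumerate_cons, List.foldl_cons]
    by_cases hx : x = i
    · subst hx
      simp only [beq_self_eq_true, if_pos, ih]
      by_cases hm : x ∈ xs
      · have hrev : x ∈ xs.reverse := List.mem_reverse.mpr hm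
        rw [List.reverse_cons, PySem.List.index?_append_of_mem _ hrev]
        simp only [List.mem_cons, hm, or_true, if_pos, List.count_cons_self,
          List.length_cons]
        simp only [Prod.mk.injEq]
        constructor <;> (push_cast; ring)
      · have hrev : x ∉ xs.reverse := fun h => hm (List.mem_reverse.mp h)
        rw [List.reverse_cons, PySem.List.index?_append_singleton_self _ _ hrev]
        simp only [List.mem_cons, true_or, if_pos, hm, List.count_cons_self,
          List.length_cons, List.length_reverse, Option.getD_some]
        simp only [Prod.mk.injEq]
        constructor <;> (push_cast; ring)
    · have hb : (x == i) = false := beq_eq_false_iff_ne.mpr hx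
      simp only [hb, if_neg, Bool.false_eq_true, not_false_iff, ih]
      have hc : (x :: xs).count i = xs.count i := by
        simp [List.count_cons]
        exact hx
      by_cases hm : i ∈ xs
      · have hrev : i ∈ xs.reverse := List.mem_reverse.mpr hm
        rw [List.reverse_cons, PySem.List.index?_append_of_mem _ hrev]
        simp only [List.mem_cons, hm, or_true, if_pos, hc, List.length_cons]
        simp only [Prod.mk.injEq, true_and]
        push_cast; ring
      · simp only [List.mem_cons, hm, or_false, hc]
        rw [if_neg (fun h : i = x => hx h.symm)]
        simp

theorem buscar_n_elemento_spec : Claim_equal_buscar_n_elemento := by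
  intro lista i _
  unfold Spec_buscar_n_elemento buscar_n_elemento buscar_n_elemento_alt
  simp only [PySem.List.slice?_none_none_neg_one, Option.getD_some, PySem.List.count_eq]
  rw [foldA]
  simp only [List.contains_iff_mem]
  by_cases hm : i ∈ lista
  · simp only [hm, if_pos]
    norm_num
  · simp [hm]
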